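-- pv_equiv track=rewrite | github.com/Hmeon/semantic-uplink-rpi5 | common/metrics.py | _mqtt_remaining_length_nbytes
-- ===== SOURCE A (Python) =====
-- def _mqtt_remaining_length_nbytes(remaining: int) -> int:
--     """MQTT Remaining Length 가변 인코딩에 필요한 바이트 수."""
--     if remaining < 0:
--         raise ValueError("remaining must be >= 0")
--     # 1바이트에 7비트씩 사용
--     n = 1
--     while remaining > 127:
--         remaining //= 128
--         n += 1
--     return n
-- ===== SOURCE B (Python) =====
-- def _mqtt_remaining_length_nbytes(remaining: int) -> int:
--     if remaining < 0:
--         raise ValueError("remaining must be >= 0")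
--     return max(1, (remaining.bit_length() + 6) // 7)
-- ===== Notes on version B (the rewrite author's own statement) =====
-- stated objective: simpler
-- what changed: Replaced the division loop with a closed-form expression max(1, (bit_length+6)//7) counting 7-bit groups.
import Mathlib
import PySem

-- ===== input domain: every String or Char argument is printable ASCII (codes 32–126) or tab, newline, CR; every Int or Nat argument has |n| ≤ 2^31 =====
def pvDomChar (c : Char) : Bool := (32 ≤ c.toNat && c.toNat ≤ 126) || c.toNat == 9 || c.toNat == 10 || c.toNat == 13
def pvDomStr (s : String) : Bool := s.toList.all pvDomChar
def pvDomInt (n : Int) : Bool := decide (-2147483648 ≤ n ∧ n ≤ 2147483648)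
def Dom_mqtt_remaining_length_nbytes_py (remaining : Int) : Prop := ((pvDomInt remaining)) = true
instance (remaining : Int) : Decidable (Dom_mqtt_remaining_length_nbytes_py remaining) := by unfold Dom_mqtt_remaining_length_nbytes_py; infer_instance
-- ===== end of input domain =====

-- B replaces A's division loop by the closed form max(1, (bit_length+6)//7); objective: simpler.

-- ===== PORT A =====
-- A's while-loop on the (nonnegative) remaining value; Python's '//= 128' on a
-- nonnegative int is exactly Nat division, so the loop state is kept as a Nat.
def pvALoop (r : Nat) : Nat :=
  if 127 < r then pvALoop (r / 128) + 1 else 1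
decreasing_by exact Nat.div_lt_self (by omega) (by norm_num)

def mqtt_remaining_length_nbytes_py (remaining : Int) : Int :=
  if remaining < 0 then 0  -- Python raises ValueError here; excluded by Pre_
  else Int.ofNat (pvALoop remaining.toNat)

-- ===== PORT B =====
-- Python's int.bit_length() on a nonnegative int is exactly Nat.size.
def mqtt_remaining_length_nbytes_py_alt (remaining : Int) : Int :=
  if remaining < 0 then 0  -- Source B raises ValueError here; excluded by Pre_
  else Int.ofNat (max 1 ((Nat.size remaining.toNat + 6) / 7))

-- ===== PRECONDITION & SPEC =====
-- Pre_ excludes exactly the inputs where A (and B) raise ValueError: remaining < 0.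
def Pre_mqtt_remaining_length_nbytes_py (remaining : Int) : Prop := 0 ≤ remaining
instance (remaining : Int) : Decidable (Pre_mqtt_remaining_length_nbytes_py remaining) := by unfold Pre_mqtt_remaining_length_nbytes_py; infer_instance
def pvWitness_mqtt_remaining_length_nbytes_py : Int := 200

def Spec_mqtt_remaining_length_nbytes_py (remaining : Int) (out : Int) : Prop := out = mqtt_remaining_length_nbytes_py_alt remaining
instance (remaining : Int) (out : Int) : Decidable (Spec_mqtt_remaining_length_nbytes_py remaining out) := by unfold Spec_mqtt_remaining_length_nbytes_py; infer_instance

-- ===== CLAIM (what is proved, stated in full; the proofs are below) =====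
def Claim_equal_mqtt_remaining_length_nbytes_py : Prop := ∀ (remaining : Int), Dom_mqtt_remaining_length_nbytes_py remaining → Pre_mqtt_remaining_length_nbytes_py remaining → Spec_mqtt_remaining_length_nbytes_py remaining (mqtt_remaining_length_nbytes_py remaining)

-- ===== LEMMAS AND PROOFS =====
theorem pvSizeStep (r : Nat) (h : 128 ≤ r) :
    Nat.size r = Nat.size (r / 128) + 7 := by
  set s := Nat.size (r / 128) with hs
  have hpos : 1 ≤ r / 128 := Nat.one_le_div_iff (by norm_num) |>.mpr h
  have hs1 : 1 ≤ s := by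
    have := Nat.lt_size.mpr (show 2 ^ 0 ≤ r / 128 by simpa using hpos)
    omega
  have hub : r / 128 < 2 ^ s := Nat.lt_size_self _
  have hlb : 2 ^ (s - 1) ≤ r / 128 := Nat.lt_size.mp (by omega)
  have hub' : r < 2 ^ (s + 7) := by
    have : r < 2 ^ s * 128 := (Nat.div_lt_iff_lt_mul (by norm_num)).mp hub
    calc r < 2 ^ s * 128 := this
      _ = 2 ^ (s + 7) := by rw [pow_add]; norm_num
  have hlb' : 2 ^ (s + 6) ≤ r := by
    have : 2 ^ (s - 1) * 128 ≤ r := (Nat.le_div_iff_mul_le (by norm_num)).mp hlb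
    calc 2 ^ (s + 6) = 2 ^ (s - 1) * 128 := by
          rw [show s + 6 = (s - 1) + 7 by omega, pow_add]; norm_num
      _ ≤ r := this
  have h1 : Nat.size r ≤ s + 7 := Nat.size_le.mpr hub'
  have h2 : s + 6 < Nat.size r := Nat.lt_size.mpr hlb'
  omega

theorem pvALoop_closed (r : Nat) : pvALoop r = max 1 ((Nat.size r + 6) / 7) := by
  induction r using Nat.strong_induction_on with
  | _ r ih =>
    rw [pvALoop]
    split
    · rename_i h
      rw [ih (r / 128) (Nat.div_lt_self (by omega) (by norm_num))]
      have hstep := pvSizeStep r (by omega)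
      have hpos : 1 ≤ r / 128 := Nat.one_le_div_iff (by norm_num) |>.mpr (by omega)
      have hs1 : 1 ≤ Nat.size (r / 128) := by
        have := Nat.lt_size.mpr (show 2 ^ 0 ≤ r / 128 by simpa using hpos)
        omega
      omega
    · rename_i h
      have : Nat.size r ≤ 7 := Nat.size_le.mpr (by norm_num; omega)
      omega

-- ===== VERDICT (by name: the statement is the Claim_ definition above) =====
theorem mqtt_remaining_length_nbytes_py_spec : Claim_equal_mqtt_remaining_length_nbytes_py := by
  intro remaining _ hpre
  unfold Spec_mqtt_remaining_length_nbytes_py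
  unfold mqtt_remaining_length_nbytes_py mqtt_remaining_length_nbytes_py_alt
  have hneg : ¬ remaining < 0 := by exact not_lt.mpr hpre
  simp only [hneg, if_false]
  exact congrArg Int.ofNat (pvALoop_closed remaining.toNat)
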